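-- pv_equiv track=rewrite | github.com/Vlas-XIII/python_gb | sem06/hw002.py | unic
-- ===== SOURCE A (Python) =====
-- def unic(lst):
--     result = []
--     for i in range(len(lst)):
--         result = [lst[i]]
--         for j in range(i, len(lst)):
--             if lst[j] > result[len(result) - 1]:
--                 result.append(lst[j])
--         if len(result) != 1:
--             break
--     return result
-- ===== SOURCE B (Python) =====
-- def unic(lst):
--     if not lst:
--         return []
--     n = len(lst)
--     # one right-to-left pass: cand = smallest i with max(lst[i+1:]) > lst[i]
--     cand = None
--     suf = lst[n - 1]
--     for i in range(n - 2, -1, -1):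
--         if suf > lst[i]:
--             cand = i
--         if lst[i] > suf:
--             suf = lst[i]
--     if cand is None:
--         return [lst[n - 1]]
--     # one greedy forward pass from cand
--     res = [lst[cand]]
--     for x in lst[cand + 1:]:
--         if x > res[-1]:
--             res.append(x)
--     return res
-- ===== Notes on version B (the rewrite author's own statement) =====
-- stated objective: faster
-- what changed: A restarts a greedy pass at every index until one grows; B finds the start index with a single right-to-left suffix-maximum scan and then does one greedy forward pass.
import Mathlib
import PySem

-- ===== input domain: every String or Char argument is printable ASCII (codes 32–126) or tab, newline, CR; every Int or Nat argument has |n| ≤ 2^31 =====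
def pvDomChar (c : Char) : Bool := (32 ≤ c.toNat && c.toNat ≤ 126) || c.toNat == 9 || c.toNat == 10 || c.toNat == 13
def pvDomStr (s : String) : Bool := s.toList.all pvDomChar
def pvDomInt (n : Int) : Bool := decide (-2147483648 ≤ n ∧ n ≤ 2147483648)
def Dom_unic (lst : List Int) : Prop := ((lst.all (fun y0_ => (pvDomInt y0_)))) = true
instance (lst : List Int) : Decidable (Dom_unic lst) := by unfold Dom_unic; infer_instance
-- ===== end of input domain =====

-- B replaces A's restart-at-every-index outer loop (quadratic on decreasing lists) by one
-- right-to-left suffix-maximum scan locating the start index plus one greedy forward pass.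

-- ===== PORT A =====
-- inner loop: result = [lst[i]]; for j in range(i, len(lst)): append lst[j] if it exceeds result[-1]
def unicInner (lst : List Int) (i : Int) : List Int :=
  (PySem.List.pyRange i (lst.length : Int) 1).foldl
    (fun r j =>
      if PySem.List.pyGetD lst j 0 > PySem.List.pyGetD r ((r.length : Int) - 1) 0
      then r ++ [PySem.List.pyGetD lst j 0] else r)
    [PySem.List.pyGetD lst i 0]

-- outer loop with the early 'break' (recursion over the remaining indices)
def unicOuter (lst : List Int) : List Int → List Int → List Int
  | [], result => result
  | i :: rest, _ =>
    let r := unicInner lst i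
    if r.length ≠ 1 then r else unicOuter lst rest r

def unic (lst : List Int) : List Int :=
  unicOuter lst (PySem.List.pyRange 0 (lst.length : Int) 1) []

-- ===== PORT B =====
-- one step of the right-to-left scan: update candidate start and running suffix maximum
def unicAltScanStep (lst : List Int) (st : Option Int × Int) (i : Int) : Option Int × Int :=
  (if st.2 > PySem.List.pyGetD lst i 0 then some i else st.1,
   if PySem.List.pyGetD lst i 0 > st.2 then PySem.List.pyGetD lst i 0 else st.2)

-- one step of the greedy forward pass (res[-1] is Python's negative index)
def unicAltGreedy (r : List Int) (x : Int) : List Int :=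
  if x > PySem.List.pyGetD r (-1) 0 then r ++ [x] else r

def unic_alt (lst : List Int) : List Int :=
  if lst = [] then []
  else
    match ((PySem.List.pyRange ((lst.length : Int) - 2) (-1) (-1)).foldl (unicAltScanStep lst)
            ((none : Option Int), PySem.List.pyGetD lst ((lst.length : Int) - 1) 0)).1 with
    | none => [PySem.List.pyGetD lst ((lst.length : Int) - 1) 0]
    | some c => (PySem.List.slice lst (some (c + 1)) none).foldl unicAltGreedy
                  [PySem.List.pyGetD lst c 0]

-- ===== PRECONDITION & SPEC =====
def Spec_unic (lst : List Int) (out : List Int) : Prop := out = unic_alt lst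
instance (lst : List Int) (out : List Int) : Decidable (Spec_unic lst out) := by unfold Spec_unic; infer_instance

-- ===== CLAIM (what is proved, stated in full; the proofs are below) =====
def Claim_equal_unic : Prop := ∀ (lst : List Int), Dom_unic lst → Spec_unic lst (unic lst)

-- ===== LEMMAS AND PROOFS =====

-- the greedy increasing pass, abstractly: keep x when it exceeds the last kept element
def pvG (a : Int) : List Int → List Int
  | [] => []
  | x :: xs => if a < x then x :: pvG x xs else pvG a xs

-- common characterisation of both programs' result
def pvCore : List Int → List Int
  | [] => []
  | [x] => [x]
  | x :: y :: ys => if (y :: ys).any (fun z => decide (x < z)) then x :: pvG x (y :: ys) else pvCore (y :: ys)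

-- B's scan, structurally: (candidate relative start index, suffix maximum)
def pvScan : List Int → Option Nat × Int
  | [] => (none, 0)
  | [x] => (none, x)
  | x :: y :: ys =>
      let p := pvScan (y :: ys)
      (if p.2 > x then some 0 else p.1.map (· + 1), if x > p.2 then x else p.2)

theorem pvG_eq_nil_iff (a : Int) (xs : List Int) :
    pvG a xs = [] ↔ ∀ z ∈ xs, ¬ a < z := by
  induction xs generalizing a with
  | nil => simp [pvG]
  | cons x xs IH =>
    simp only [pvG]
    split_ifs with hx
    · constructor
      · intro h; exact absurd h (by simp)
      · intro h; exact absurd hx (h x (by simp))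
    · rw [IH]
      constructor
      · intro h z hz
        rcases List.mem_cons.mp hz with rfl | hz'
        · exact hx
        · exact h z hz'
      · intro h z hz
        exact h z (List.mem_cons_of_mem _ hz)

theorem pyGetD_append_singleton_last (pre : List Int) (a : Int) :
    PySem.List.pyGetD (pre ++ [a]) (((pre ++ [a]).length : Int) - 1) 0 = a := by
  have h1 : (((pre ++ [a]).length : Int) - 1) = ((pre.length : Nat) : Int) := by
    simp
  rw [h1, PySem.List.pyGetD_natCast]
  simp [List.getD_eq_getElem?_getD]

theorem foldl_stepA (xs : List Int) :
    ∀ (pre : List Int) (a : Int),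
    xs.foldl (fun r x =>
      if x > PySem.List.pyGetD r ((r.length : Int) - 1) 0 then r ++ [x] else r) (pre ++ [a])
    = pre ++ a :: pvG a xs := by
  induction xs with
  | nil => intro pre a; simp [pvG]
  | cons x xs IH =>
    intro pre a
    simp only [List.foldl_cons, pyGetD_append_singleton_last, pvG]
    split_ifs with hx
    · have := IH (pre ++ [a]) x
      simpa using this
    · exact IH pre a

theorem foldl_stepB (xs : List Int) :
    ∀ (pre : List Int) (a : Int),
    xs.foldl unicAltGreedy (pre ++ [a]) = pre ++ a :: pvG a xs := by
  induction xs with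
  | nil => intro pre a; simp [pvG]
  | cons x xs IH =>
    intro pre a
    simp only [List.foldl_cons, unicAltGreedy, PySem.List.pyGetD_neg_one_append_singleton, pvG]
    split_ifs with hx
    · have := IH (pre ++ [a]) x
      simpa using this
    · exact IH pre a

theorem inner_char (lst : List Int) (i : Nat) (h : i < lst.length) :
    unicInner lst (i : Int) = lst[i] :: pvG lst[i] (lst.drop (i + 1)) := by
  unfold unicInner
  rw [PySem.List.foldl_pyRange_pyGetD' lst 0
    (fun r x => if x > PySem.List.pyGetD r ((r.length : Int) - 1) 0 then r ++ [x] else r)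
    _ (by positivity)]
  rw [Int.toNat_natCast]
  rw [List.drop_eq_getElem_cons h]
  have hgi : PySem.List.pyGetD lst (i : Int) 0 = lst[i] := by
    rw [PySem.List.pyGetD_natCast, List.getD_eq_getElem?_getD]
    simp [List.getElem?_eq_getElem h]
  rw [hgi]
  simp only [List.foldl_cons]
  have hfirst : PySem.List.pyGetD [lst[i]] ((([lst[i]] : List Int).length : Int) - 1) 0 = lst[i] := by
    simpa using pyGetD_append_singleton_last [] lst[i]
  rw [hfirst, if_neg (by omega)]
  have := foldl_stepA (lst.drop (i + 1)) [] lst[i]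
  simpa using this

theorem outer_char (lst : List Int) :
    ∀ (k i : Nat) (r : List Int), i + k = lst.length → i < lst.length →
    unicOuter lst (PySem.List.pyRange (i : Int) (lst.length : Int) 1) r = pvCore (lst.drop i) := by
  intro k
  induction k with
  | zero => intro i r hk hi; omega
  | succ k IH =>
    intro i r hk hi
    rw [PySem.List.pyRange_one_cons (by exact_mod_cast hi)]
    show (if (unicInner lst i).length ≠ 1 then unicInner lst i
          else unicOuter lst (PySem.List.pyRange ((i : Int) + 1) (lst.length : Int) 1) (unicInner lst i))
          = pvCore (lst.drop i)
    rw [inner_char lst i hi, List.drop_eq_getElem_cons hi]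
    rcases hd : lst.drop (i + 1) with _ | ⟨y, ys⟩
    · have hlen2 : lst.length ≤ i + 1 := by
        have := List.drop_eq_nil_iff.mp hd
        omega
      rw [if_neg (by simp [pvG])]
      rw [PySem.List.pyRange_one_eq_nil (by omega)]
      simp [unicOuter, pvG, pvCore]
    · by_cases hany : ∃ z ∈ y :: ys, lst[i] < z
      · have hne2 : pvG lst[i] (y :: ys) ≠ [] := by
          rw [ne_eq, pvG_eq_nil_iff]
          push_neg
          exact hany
        rw [if_pos (by simp [hne2])]
        obtain ⟨z, hz, hltz⟩ := hany
        rw [pvCore, if_pos (List.any_eq_true.mpr ⟨z, hz, by simpa using hltz⟩)]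
      · have hnil : pvG lst[i] (y :: ys) = [] := by
          rw [pvG_eq_nil_iff]
          intro z hz hlt
          exact hany ⟨z, hz, hlt⟩
        rw [hnil, if_neg (by simp)]
        have hend : i + 1 < lst.length := by
          have := congrArg List.length hd
          simp at this
          omega
        have h2 : ((i : Int) + 1) = (((i + 1 : Nat) : Nat) : Int) := by push_cast; ring
        rw [h2, IH (i + 1) _ (by omega) hend, hd]
        symm
        rw [pvCore, if_neg (by intro hcond; exact hany (by simpa using hcond))]

theorem A_char (lst : List Int) : unic lst = pvCore lst := by
  rcases lst with _ | ⟨x, xs⟩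
  · rfl
  · show unicOuter _ (PySem.List.pyRange 0 _ 1) [] = _
    have h0 : (0 : Int) = ((0 : Nat) : Int) := rfl
    rw [h0, outer_char (x :: xs) (x :: xs).length 0 [] (by omega) (by simp)]
    rfl

theorem pvScan_snd_max (xs : List Int) (h : xs ≠ []) :
    (pvScan xs).2 ∈ xs ∧ ∀ z ∈ xs, z ≤ (pvScan xs).2 := by
  induction xs with
  | nil => exact absurd rfl h
  | cons x xs IH =>
    rcases xs with _ | ⟨y, ys⟩
    · simp [pvScan]
    · obtain ⟨hmem, hmax⟩ := IH (by simp)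
      simp only [pvScan]
      split_ifs with hx
      · refine ⟨by simp, ?_⟩
        intro z hz
        rcases List.mem_cons.mp hz with rfl | hz'
        · omega
        · have := hmax z hz'
          omega
      · refine ⟨List.mem_cons_of_mem _ hmem, ?_⟩
        intro z hz
        rcases List.mem_cons.mp hz with rfl | hz'
        · omega
        · exact hmax z hz'

theorem pvScan_gt_iff (xs : List Int) (h : xs ≠ []) (x : Int) :
    x < (pvScan xs).2 ↔ xs.any (fun z => decide (x < z)) = true := by
  obtain ⟨hmem, hmax⟩ := pvScan_snd_max xs h
  constructor
  · intro hlt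
    simp only [List.any_eq_true]
    exact ⟨(pvScan xs).2, hmem, by simpa using hlt⟩
  · intro hany
    simp only [List.any_eq_true] at hany
    obtain ⟨z, hz, hlt⟩ := hany
    have := hmax z hz
    simp only [decide_eq_true_eq] at hlt
    omega

theorem pvScan_none (xs : List Int) (h : xs ≠ []) :
    (pvScan xs).1 = none → pvCore xs = [xs.getLast h] := by
  induction xs with
  | nil => exact absurd rfl h
  | cons x xs IH =>
    rcases xs with _ | ⟨y, ys⟩
    · intro _; rfl
    · simp only [pvScan]
      split_ifs with hx
      · intro hc; simp at hc
      · intro hc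
        simp only [Option.map_eq_none_iff] at hc
        have hrec := IH (by simp) hc
        show pvCore (x :: y :: ys) = _
        rw [pvCore, if_neg ?_]
        · rw [hrec]
          simp [List.getLast_cons]
        · rw [← pvScan_gt_iff (y :: ys) (by simp) x]
          omega

theorem pvScan_some (xs : List Int) (d : Nat) :
    (pvScan xs).1 = some d → ∃ h : d < xs.length, pvCore xs = xs[d] :: pvG xs[d] (xs.drop (d + 1)) := by
  induction xs generalizing d with
  | nil => intro hc; simp [pvScan] at hc
  | cons x xs IH =>
    rcases xs with _ | ⟨y, ys⟩
    · intro hc; simp [pvScan] at hc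
    · simp only [pvScan]
      split_ifs with hx
      · intro hc
        simp only [Option.some.injEq] at hc
        subst hc
        refine ⟨by simp, ?_⟩
        show pvCore (x :: y :: ys) = _
        rw [pvCore, if_pos (by rw [← pvScan_gt_iff (y :: ys) (by simp) x]; omega)]
        rfl
      · intro hc
        rcases hmap : (pvScan (y :: ys)).1 with _ | d'
        · rw [hmap] at hc; simp at hc
        · rw [hmap] at hc
          simp only [Option.map_some, Option.some.injEq] at hc
          obtain ⟨hlt, hrec⟩ := IH d' hmap
          refine ⟨by simp at hlt ⊢; omega, ?_⟩
          show pvCore (x :: y :: ys) = _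
          rw [pvCore, if_neg (by rw [← pvScan_gt_iff (y :: ys) (by simp) x]; omega)]
          rw [hrec]
          subst hc
          congr 1

theorem foldr_scan (lst : List Int) :
    ∀ (k a : Nat), a + k + 1 = lst.length →
    (PySem.List.pyRange (a : Int) ((lst.length : Int) - 1) 1).foldr
        (fun i st => unicAltScanStep lst st i)
        ((none : Option Int), PySem.List.pyGetD lst ((lst.length : Int) - 1) 0)
    = (((pvScan (lst.drop a)).1).map (fun d => ((a + d : Nat) : Int)), (pvScan (lst.drop a)).2) := by
  intro k
  induction k with
  | zero =>
    intro a hk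
    have hnil : PySem.List.pyRange (a : Int) ((lst.length : Int) - 1) 1 = [] := by
      apply PySem.List.pyRange_one_eq_nil; omega
    rw [hnil]
    have ha : a < lst.length := by omega
    have hd1 : lst.drop (a + 1) = [] := List.drop_eq_nil_iff.mpr (by omega)
    rw [List.drop_eq_getElem_cons ha, hd1]
    have hge : PySem.List.pyGetD lst ((lst.length : Int) - 1) 0 = lst[a] := by
      have h1 : ((lst.length : Int) - 1) = ((a : Nat) : Int) := by omega
      rw [h1, PySem.List.pyGetD_natCast, List.getD_eq_getElem?_getD, List.getElem?_eq_getElem ha]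
      rfl
    rw [hge]
    rfl
  | succ k IH =>
    intro a hk
    have ha : (a : Int) < (lst.length : Int) - 1 := by omega
    have ha' : a < lst.length := by omega
    rw [PySem.List.pyRange_one_cons ha, List.foldr_cons]
    have h2 : ((a : Int) + 1) = (((a + 1 : Nat) : Nat) : Int) := by push_cast; ring
    rw [h2, IH (a + 1) (by omega)]
    have hga : PySem.List.pyGetD lst (a : Int) 0 = lst[a] := by
      rw [PySem.List.pyGetD_natCast, List.getD_eq_getElem?_getD, List.getElem?_eq_getElem ha']
      rfl
    rw [List.drop_eq_getElem_cons ha']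
    rcases hd : lst.drop (a + 1) with _ | ⟨y, ys⟩
    · have := List.drop_eq_nil_iff.mp hd
      omega
    · have hscan : pvScan (lst[a] :: y :: ys)
          = (if (pvScan (y :: ys)).2 > lst[a] then some 0 else (pvScan (y :: ys)).1.map (· + 1),
             if lst[a] > (pvScan (y :: ys)).2 then lst[a] else (pvScan (y :: ys)).2) := rfl
      rw [hscan]
      simp only [unicAltScanStep, hga]
      rw [Prod.mk.injEq]
      constructor
      · split_ifs with hx
        · simp
        · rw [Option.map_map]
          rcases h3 : (pvScan (y :: ys)).1 with _ | d
          · rfl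
          · simp only [Option.map_some, Function.comp_apply]
            congr 1
            omega
      · rfl

theorem B_char (lst : List Int) : unic_alt lst = pvCore lst := by
  by_cases hne : lst = []
  · rw [hne]; rfl
  · have hlen : 0 < lst.length := List.length_pos_iff.mpr hne
    unfold unic_alt
    rw [if_neg hne]
    have e2 : ((lst.length : Int) - 2) + 1 = (lst.length : Int) - 1 := by ring
    have hrev : PySem.List.pyRange ((lst.length : Int) - 2) (-1) (-1)
        = (PySem.List.pyRange 0 ((lst.length : Int) - 1) 1).reverse := by
      rw [PySem.List.pyRange_neg_one_eq_reverse, e2]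
      norm_num
    rw [hrev, List.foldl_reverse]
    have hfold := foldr_scan lst (lst.length - 1) 0 (by omega)
    simp only [Nat.cast_zero, List.drop_zero] at hfold
    rw [hfold]
    rcases hs : (pvScan lst).1 with _ | d
    · simp only [Option.map_none]
      rw [pvScan_none lst hne hs]
      congr 1
      have h1 : ((lst.length : Int) - 1) = (((lst.length - 1 : Nat) : Nat) : Int) := by omega
      rw [h1, PySem.List.pyGetD_natCast, List.getD_eq_getElem?_getD,
        List.getElem?_eq_getElem (by omega), List.getLast_eq_getElem]
      rfl
    · obtain ⟨hd, hcore⟩ := pvScan_some lst d hs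
      simp only [Option.map_some]
      have hz : ((0 + d : Nat) : Int) = (d : Int) := by push_cast; ring
      rw [hz]
      have hslice : PySem.List.slice lst (some ((d : Int) + 1)) none = lst.drop (d + 1) := by
        have h4 : ((d : Int) + 1) = (((d + 1 : Nat) : Nat) : Int) := by push_cast; ring
        rw [h4, PySem.List.slice_from_natCast]
      rw [hslice]
      have hgd : PySem.List.pyGetD lst (d : Int) 0 = lst[d] := by
        rw [PySem.List.pyGetD_natCast, List.getD_eq_getElem?_getD, List.getElem?_eq_getElem hd]
        rfl
      rw [hgd, hcore]
      have := foldl_stepB (lst.drop (d + 1)) [] lst[d]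
      simpa using this

-- ===== VERDICT (by name: the statement is the Claim_ definition above) =====
theorem unic_spec : Claim_equal_unic := by
  intro lst _
  unfold Spec_unic
  rw [A_char, B_char]
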